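-- pv_equiv track=rewrite | github.com/enoki/bandleader | goo.py | note_to_goo_3_4
-- ===== SOURCE A (Python) =====
-- def note_to_goo_3_4(score_bar, note, duration, bar_index):
--     goo = []
--
--     beat_offset = bar_index % 4
--
--     if beat_offset in (1, 3):
--         goo.append((note, '16'))
--         duration -= 1
--         bar_index += 1
--     elif beat_offset == 2 and duration >= 2:
--         goo.append((note, '8'))
--         duration -= 2
--         bar_index += 2
--     else: # beat_offset == 0
--         if duration == 1:
--             goo.append((note, '16'))
--         elif duration == 2:
--             goo.append((note, '8'))
--         elif duration == 3:
--             goo.append((note, '8.'))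
--         elif duration == 4:
--             goo.append((note, '4'))
--         elif duration == 5:
--             goo.append((note, '4'))
--             goo.append(('~', '0'))
--             goo.append((note, '16'))
--         elif duration == 6:
--             goo.append((note, '4.'))
--         elif duration == 7:
--             goo.append((note, '4'))
--             goo.append(('~', '0'))
--             goo.append((note, '8.'))
--         elif duration == 8:
--             goo.append((note, '2'))
--         elif duration == 9:
--             goo.append((note, '2'))
--             goo.append(('~', '0'))
--             goo.append((note, '16'))
--         elif duration == 10:
--             goo.append((note, '2'))
--             goo.append(('~', '0'))
--             goo.append((note, '8'))
--         elif duration == 11: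
--             goo.append((note, '2'))
--             goo.append(('~', '0'))
--             goo.append((note, '8.'))
--         elif duration == 12:
--             goo.append((note, '2.'))
--         return goo
--
--     if duration > 0:
--         goo.append(('~', '0'))
--         goo.extend(note_to_goo_3_4(score_bar, note, duration, bar_index))
--
--     return goo
-- ===== SOURCE B (Python) =====
-- _TABLE = {1: ['16'], 2: ['8'], 3: ['8.'], 4: ['4'], 5: ['4', '16'],
--           6: ['4.'], 7: ['4', '8.'], 8: ['2'], 9: ['2', '16'],
--           10: ['2', '8'], 11: ['2', '8.'], 12: ['2.']}
--
--
-- def note_to_goo_3_4(score_bar, note, duration, bar_index):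
--     goo = []
--     while True:
--         off = bar_index % 4
--         if off == 1 or off == 3:
--             goo.append((note, '16'))
--             duration -= 1
--             bar_index += 1
--         elif off == 2 and duration >= 2:
--             goo.append((note, '8'))
--             duration -= 2
--             bar_index += 2
--         else:
--             for i, tok in enumerate(_TABLE.get(duration, [])):
--                 if i:
--                     goo.append(('~', '0'))
--                 goo.append((note, tok))
--             break
--         if duration > 0:
--             goo.append(('~', '0'))
--         else:
--             break
--     return goo
-- ===== Notes on version B (the rewrite author's own statement) =====
-- stated objective: idiomatic
-- what changed: Replaces tail recursion plus a 12-branch elif chain with an iterative while loop over (goo, duration, bar_index) and a duration->tokens lookup table rendered by a small enumerate loop.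
import Mathlib
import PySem

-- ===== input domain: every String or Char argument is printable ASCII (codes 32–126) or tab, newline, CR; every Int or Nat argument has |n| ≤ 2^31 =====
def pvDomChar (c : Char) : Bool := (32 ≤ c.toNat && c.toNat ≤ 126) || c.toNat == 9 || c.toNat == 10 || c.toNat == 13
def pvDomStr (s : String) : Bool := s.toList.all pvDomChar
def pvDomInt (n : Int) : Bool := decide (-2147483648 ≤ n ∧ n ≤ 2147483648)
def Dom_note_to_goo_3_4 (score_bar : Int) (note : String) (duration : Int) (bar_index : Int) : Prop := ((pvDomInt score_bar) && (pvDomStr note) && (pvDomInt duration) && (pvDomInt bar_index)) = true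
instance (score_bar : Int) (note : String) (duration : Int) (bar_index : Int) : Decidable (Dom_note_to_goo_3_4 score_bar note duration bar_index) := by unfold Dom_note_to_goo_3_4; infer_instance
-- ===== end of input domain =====

-- B rewrites A's tail recursion + 12-branch elif chain as a while loop with an accumulator
-- and a duration→tokens lookup table (objective: idiomatic; same cost).

-- ===== PORT A =====
-- tail recursion on decreasing duration; the else branch is the literal elif chain
def note_to_goo_3_4 (score_bar : Int) (note : String) (duration : Int) (bar_index : Int) : List (String × String) :=
  if PySem.Int.mod bar_index 4 = 1 ∨ PySem.Int.mod bar_index 4 = 3 then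
    if _h : duration - 1 > 0 then
      (note, "16") :: ("~", "0") :: note_to_goo_3_4 score_bar note (duration - 1) (bar_index + 1)
    else [(note, "16")]
  else if PySem.Int.mod bar_index 4 = 2 ∧ duration ≥ 2 then
    if _h : duration - 2 > 0 then
      (note, "8") :: ("~", "0") :: note_to_goo_3_4 score_bar note (duration - 2) (bar_index + 2)
    else [(note, "8")]
  else
    if duration = 1 then [(note, "16")]
    else if duration = 2 then [(note, "8")]
    else if duration = 3 then [(note, "8.")]
    else if duration = 4 then [(note, "4")]
    else if duration = 5 then [(note, "4"), ("~", "0"), (note, "16")]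
    else if duration = 6 then [(note, "4.")]
    else if duration = 7 then [(note, "4"), ("~", "0"), (note, "8.")]
    else if duration = 8 then [(note, "2")]
    else if duration = 9 then [(note, "2"), ("~", "0"), (note, "16")]
    else if duration = 10 then [(note, "2"), ("~", "0"), (note, "8")]
    else if duration = 11 then [(note, "2"), ("~", "0"), (note, "8.")]
    else if duration = 12 then [(note, "2.")]
    else []
termination_by duration.toNat
decreasing_by all_goals omega

-- ===== PORT B =====
-- the module-level _TABLE dict of Source B
def gooTable : PySem.Dict Int (List String) :=
  PySem.Dict.mk
  [(1, ["16"]), (2, ["8"]), (3, ["8."]), (4, ["4"]), (5, ["4", "16"]), (6, ["4."]),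
   (7, ["4", "8."]), (8, ["2"]), (9, ["2", "16"]), (10, ["2", "8"]), (11, ["2", "8."]), (12, ["2."])]

-- 'for i, tok in enumerate(parts): if i: append(('~','0')); append((note, tok))'
def gooBase (note : String) (parts : List String) : List (String × String) :=
  (PySem.List.enumerate parts).foldl
    (fun g it => (g ++ (if it.1 ≠ 0 then [("~", "0")] else [])) ++ [(note, it.2)]) []

-- the 'while True' loop of Source B, state = (goo, duration, bar_index)
def gooLoop (note : String) (goo : List (String × String)) (duration : Int) (bar_index : Int) : List (String × String) :=
  if PySem.Int.mod bar_index 4 = 1 ∨ PySem.Int.mod bar_index 4 = 3 then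
    if _h : duration - 1 > 0 then
      gooLoop note (goo ++ [(note, "16"), ("~", "0")]) (duration - 1) (bar_index + 1)
    else goo ++ [(note, "16")]
  else if PySem.Int.mod bar_index 4 = 2 ∧ duration ≥ 2 then
    if _h : duration - 2 > 0 then
      gooLoop note (goo ++ [(note, "8"), ("~", "0")]) (duration - 2) (bar_index + 2)
    else goo ++ [(note, "8")]
  else goo ++ gooBase note (PySem.Dict.getD gooTable duration [])
termination_by duration.toNat
decreasing_by all_goals omega

def note_to_goo_3_4_alt (score_bar : Int) (note : String) (duration : Int) (bar_index : Int) : List (String × String) :=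
  gooLoop note [] duration bar_index

-- ===== PRECONDITION & SPEC =====
def Spec_note_to_goo_3_4 (score_bar : Int) (note : String) (duration : Int) (bar_index : Int) (out : List (String × String)) : Prop := out = note_to_goo_3_4_alt score_bar note duration bar_index
instance (score_bar : Int) (note : String) (duration : Int) (bar_index : Int) (out : List (String × String)) : Decidable (Spec_note_to_goo_3_4 score_bar note duration bar_index out) := by unfold Spec_note_to_goo_3_4; infer_instance

-- ===== CLAIM (what is proved, stated in full; the proofs are below) =====
def Claim_equal_note_to_goo_3_4 : Prop := ∀ (score_bar : Int) (note : String) (duration : Int) (bar_index : Int), Dom_note_to_goo_3_4 score_bar note duration bar_index → Spec_note_to_goo_3_4 score_bar note duration bar_index (note_to_goo_3_4 score_bar note duration bar_index)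

-- ===== LEMMAS AND PROOFS =====

-- the table+enumerate rendering equals A's elif chain
lemma gooBase_eq_chain (note : String) (d : Int) :
    gooBase note (PySem.Dict.getD gooTable d []) =
    (if d = 1 then [(note, "16")]
    else if d = 2 then [(note, "8")]
    else if d = 3 then [(note, "8.")]
    else if d = 4 then [(note, "4")]
    else if d = 5 then [(note, "4"), ("~", "0"), (note, "16")]
    else if d = 6 then [(note, "4.")]
    else if d = 7 then [(note, "4"), ("~", "0"), (note, "8.")]
    else if d = 8 then [(note, "2")]
    else if d = 9 then [(note, "2"), ("~", "0"), (note, "16")]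
    else if d = 10 then [(note, "2"), ("~", "0"), (note, "8")]
    else if d = 11 then [(note, "2"), ("~", "0"), (note, "8.")]
    else if d = 12 then [(note, "2.")]
    else []) := by
  by_cases h1 : d = 1
  · subst h1; rw [show PySem.Dict.getD gooTable 1 [] = ["16"] from by decide]
    simp [gooBase, PySem.List.enumerate]
  by_cases h2 : d = 2
  · subst h2; rw [show PySem.Dict.getD gooTable 2 [] = ["8"] from by decide]
    simp [gooBase, PySem.List.enumerate]
  by_cases h3 : d = 3
  · subst h3; rw [show PySem.Dict.getD gooTable 3 [] = ["8."] from by decide]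
    simp [gooBase, PySem.List.enumerate]
  by_cases h4 : d = 4
  · subst h4; rw [show PySem.Dict.getD gooTable 4 [] = ["4"] from by decide]
    simp [gooBase, PySem.List.enumerate]
  by_cases h5 : d = 5
  · subst h5; rw [show PySem.Dict.getD gooTable 5 [] = ["4", "16"] from by decide]
    simp [gooBase, PySem.List.enumerate]
  by_cases h6 : d = 6
  · subst h6; rw [show PySem.Dict.getD gooTable 6 [] = ["4."] from by decide]
    simp [gooBase, PySem.List.enumerate]
  by_cases h7 : d = 7
  · subst h7; rw [show PySem.Dict.getD gooTable 7 [] = ["4", "8."] from by decide]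
    simp [gooBase, PySem.List.enumerate]
  by_cases h8 : d = 8
  · subst h8; rw [show PySem.Dict.getD gooTable 8 [] = ["2"] from by decide]
    simp [gooBase, PySem.List.enumerate]
  by_cases h9 : d = 9
  · subst h9; rw [show PySem.Dict.getD gooTable 9 [] = ["2", "16"] from by decide]
    simp [gooBase, PySem.List.enumerate]
  by_cases h10 : d = 10
  · subst h10; rw [show PySem.Dict.getD gooTable 10 [] = ["2", "8"] from by decide]
    simp [gooBase, PySem.List.enumerate]
  by_cases h11 : d = 11
  · subst h11; rw [show PySem.Dict.getD gooTable 11 [] = ["2", "8."] from by decide]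
    simp [gooBase, PySem.List.enumerate]
  by_cases h12 : d = 12
  · subst h12; rw [show PySem.Dict.getD gooTable 12 [] = ["2."] from by decide]
    simp [gooBase, PySem.List.enumerate]
  rw [show PySem.Dict.getD gooTable d [] = [] from by
    simp [gooTable, PySem.Dict.getD_eq_get?_getD, PySem.Dict.get?,
      Ne.symm h1, Ne.symm h2, Ne.symm h3, Ne.symm h4, Ne.symm h5, Ne.symm h6,
      Ne.symm h7, Ne.symm h8, Ne.symm h9, Ne.symm h10, Ne.symm h11, Ne.symm h12]]
  simp [gooBase, PySem.List.enumerate, h1, h2, h3, h4, h5, h6, h7, h8, h9, h10, h11, h12]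

-- the loop with accumulator goo computes goo ++ A's recursion
lemma gooLoop_eq (score_bar : Int) (note : String) :
    ∀ (n : Nat) (d b : Int) (goo : List (String × String)), d.toNat ≤ n →
      gooLoop note goo d b = goo ++ note_to_goo_3_4 score_bar note d b := by
  intro n
  induction n with
  | zero =>
    intro d b goo hd
    have hd0 : d ≤ 0 := by omega
    rw [gooLoop, note_to_goo_3_4]
    by_cases hc1 : PySem.Int.mod b 4 = 1 ∨ PySem.Int.mod b 4 = 3
    · rw [if_pos hc1, if_pos hc1, dif_neg (by omega), dif_neg (by omega)]
    · by_cases hc2 : PySem.Int.mod b 4 = 2 ∧ d ≥ 2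
      · exact absurd hc2.2 (by omega)
      · rw [if_neg hc1, if_neg hc1, if_neg hc2, if_neg hc2, gooBase_eq_chain]
  | succ n ih =>
    intro d b goo hd
    rw [gooLoop, note_to_goo_3_4]
    by_cases hc1 : PySem.Int.mod b 4 = 1 ∨ PySem.Int.mod b 4 = 3
    · rw [if_pos hc1, if_pos hc1]
      by_cases h2 : d - 1 > 0
      · rw [dif_pos h2, dif_pos h2, ih (d - 1) (b + 1) _ (by omega)]; simp
      · rw [dif_neg h2, dif_neg h2]
    · by_cases hc2 : PySem.Int.mod b 4 = 2 ∧ d ≥ 2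
      · rw [if_neg hc1, if_neg hc1, if_pos hc2, if_pos hc2]
        by_cases h4 : d - 2 > 0
        · rw [dif_pos h4, dif_pos h4, ih (d - 2) (b + 2) _ (by omega)]; simp
        · rw [dif_neg h4, dif_neg h4]
      · rw [if_neg hc1, if_neg hc1, if_neg hc2, if_neg hc2, gooBase_eq_chain]

-- ===== VERDICT (by name: the statement is the Claim_ definition above) =====
theorem note_to_goo_3_4_spec : Claim_equal_note_to_goo_3_4 := by
  intro score_bar note duration bar_index _
  unfold Spec_note_to_goo_3_4 note_to_goo_3_4_alt
  rw [gooLoop_eq score_bar note duration.toNat duration bar_index [] le_rfl]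
  simp
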